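-- pv_equiv track=rewrite | github.com/Arjun3125/Era | persona/persistence/conversation_arc.py | _is_conflicting
-- ===== SOURCE A (Python) =====
-- def _is_conflicting(past_decision, new_decision):
--
--     negative = ["reduce", "cut", "stop", "avoid"]
--     positive = ["increase", "expand", "invest", "accelerate"]
--
--     for neg in negative:
--         for pos in positive:
--             if neg in past_decision.lower() and pos in new_decision.lower():
--                 return True
--             if pos in past_decision.lower() and neg in new_decision.lower():
--                 return True
--
--     return False
-- ===== SOURCE B (Python) =====
-- def _is_conflicting(past_decision, new_decision):
--     negative = ["reduce", "cut", "stop", "avoid"]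
--     positive = ["increase", "expand", "invest", "accelerate"]
--     past = past_decision.lower()
--     new = new_decision.lower()
--     past_neg = any(k in past for k in negative)
--     past_pos = any(k in past for k in positive)
--     new_neg = any(k in new for k in negative)
--     new_pos = any(k in new for k in positive)
--     return (past_neg and new_pos) or (past_pos and new_neg)
-- ===== Notes on version B (the rewrite author's own statement) =====
-- stated objective: simpler
-- what changed: Replaces the nested 4x4 pair loop (which recomputes .lower() and substring tests for every pair, with early returns) by lowering each string once, computing four aggregate presence flags via any(), and returning one boolean expression.
import Mathlib
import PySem

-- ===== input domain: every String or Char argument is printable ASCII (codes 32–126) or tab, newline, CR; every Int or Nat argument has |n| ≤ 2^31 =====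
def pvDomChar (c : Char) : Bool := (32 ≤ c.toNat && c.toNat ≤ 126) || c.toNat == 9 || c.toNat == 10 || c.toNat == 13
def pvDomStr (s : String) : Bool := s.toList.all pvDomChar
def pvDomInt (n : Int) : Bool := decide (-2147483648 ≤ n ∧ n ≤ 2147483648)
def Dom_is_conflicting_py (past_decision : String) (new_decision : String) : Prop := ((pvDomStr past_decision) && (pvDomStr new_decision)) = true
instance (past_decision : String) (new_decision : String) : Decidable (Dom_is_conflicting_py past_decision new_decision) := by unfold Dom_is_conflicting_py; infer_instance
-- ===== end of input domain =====

-- ===== PORT A =====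
-- A scans all (neg, pos) pairs, re-lowering both strings at each test, returning at the first hit.
def pvNegative : List String := ["reduce", "cut", "stop", "avoid"]
def pvPositive : List String := ["increase", "expand", "invest", "accelerate"]

def pvInnerA (past_decision new_decision neg : String) : List String → Bool
  | [] => false
  | pos :: rest =>
    if PySem.Str.isIn neg (PySem.Str.lower past_decision) && PySem.Str.isIn pos (PySem.Str.lower new_decision) then true
    else if PySem.Str.isIn pos (PySem.Str.lower past_decision) && PySem.Str.isIn neg (PySem.Str.lower new_decision) then true
    else pvInnerA past_decision new_decision neg rest

def pvOuterA (past_decision new_decision : String) : List String → Bool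
  | [] => false
  | neg :: rest =>
    if pvInnerA past_decision new_decision neg pvPositive then true
    else pvOuterA past_decision new_decision rest

def is_conflicting_py (past_decision : String) (new_decision : String) : Bool :=
  pvOuterA past_decision new_decision pvNegative

-- ===== PORT B =====
-- B lowers each string once, computes four aggregate presence flags, and combines them.
def is_conflicting_py_alt (past_decision : String) (new_decision : String) : Bool :=
  let past := PySem.Str.lower past_decision
  let new := PySem.Str.lower new_decision
  let past_neg := pvNegative.any (fun k => PySem.Str.isIn k past)
  let past_pos := pvPositive.any (fun k => PySem.Str.isIn k past)
  let new_neg := pvNegative.any (fun k => PySem.Str.isIn k new)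
  let new_pos := pvPositive.any (fun k => PySem.Str.isIn k new)
  (past_neg && new_pos) || (past_pos && new_neg)

-- ===== PRECONDITION & SPEC =====
def Spec_is_conflicting_py (past_decision : String) (new_decision : String) (out : Bool) : Prop := out = is_conflicting_py_alt past_decision new_decision
instance (past_decision : String) (new_decision : String) (out : Bool) : Decidable (Spec_is_conflicting_py past_decision new_decision out) := by unfold Spec_is_conflicting_py; infer_instance

-- ===== CLAIM (what is proved, stated in full; the proofs are below) =====
def Claim_equal_is_conflicting_py : Prop := ∀ (past_decision : String) (new_decision : String), Dom_is_conflicting_py past_decision new_decision → Spec_is_conflicting_py past_decision new_decision (is_conflicting_py past_decision new_decision)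

-- ===== LEMMAS AND PROOFS =====

theorem pv_ite_or (c x : Bool) : (if c = true then true else x) = (c || x) := by
  cases c <;> rfl

-- ===== VERDICT (by name: the statement is the Claim_ definition above) =====
theorem is_conflicting_py_spec : Claim_equal_is_conflicting_py := by
  intro p n _
  unfold Spec_is_conflicting_py is_conflicting_py is_conflicting_py_alt
  simp only [pvNegative, pvPositive, pvOuterA, pvInnerA, List.any_cons, List.any_nil, pv_ite_or]
  generalize PySem.Str.isIn "reduce" (PySem.Str.lower p) = a1
  generalize PySem.Str.isIn "cut" (PySem.Str.lower p) = a2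
  generalize PySem.Str.isIn "stop" (PySem.Str.lower p) = a3
  generalize PySem.Str.isIn "avoid" (PySem.Str.lower p) = a4
  generalize PySem.Str.isIn "increase" (PySem.Str.lower p) = b1
  generalize PySem.Str.isIn "expand" (PySem.Str.lower p) = b2
  generalize PySem.Str.isIn "invest" (PySem.Str.lower p) = b3
  generalize PySem.Str.isIn "accelerate" (PySem.Str.lower p) = b4
  generalize PySem.Str.isIn "reduce" (PySem.Str.lower n) = c1
  generalize PySem.Str.isIn "cut" (PySem.Str.lower n) = c2
  generalize PySem.Str.isIn "stop" (PySem.Str.lower n) = c3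
  generalize PySem.Str.isIn "avoid" (PySem.Str.lower n) = c4
  generalize PySem.Str.isIn "increase" (PySem.Str.lower n) = d1
  generalize PySem.Str.isIn "expand" (PySem.Str.lower n) = d2
  generalize PySem.Str.isIn "invest" (PySem.Str.lower n) = d3
  generalize PySem.Str.isIn "accelerate" (PySem.Str.lower n) = d4
  revert a1 a2 a3 a4 b1 b2 b3 b4 c1 c2 c3 c4 d1 d2 d3 d4
  decide
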